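-- pv_equiv track=rewrite | github.com/tjamescouch/exactus | boolean_validate_parity.py | decode_monomial_indices
-- ===== SOURCE A (Python) =====
-- from typing import List, Tuple, Dict, Callable
--
-- def nck(n: int, k: int) -> int:
--     if k < 0 or k > n: return 0
--     if k == 0 or k == n: return 1
--     k = min(k, n-k); num=1; den=1
--     for i in range(1,k+1):
--         num *= (n-(k-i)); den *= i
--     return num//den
--
-- def decode_monomial_indices(k: int, D: int, deg: int) -> Tuple[int, ...]:
--     if deg == 0: return tuple()
--     idx = []; prev = 0; rem = k
--     for i in range(deg):
--         for v in range(prev, D):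
--             rest = nck((D - v) + (deg - i - 1) - 1, (deg - i - 1))
--             if rest <= rem:
--                 rem -= rest; continue
--             idx.append(v); prev = v; break
--     return tuple(idx)
-- ===== SOURCE B (Python) =====
-- def nck(n: int, k: int) -> int:
--     if k < 0 or k > n: return 0
--     if k == 0 or k == n: return 1
--     k = min(k, n-k); num=1; den=1
--     for i in range(1,k+1):
--         num *= (n-(k-i)); den *= i
--     return num//den
--
-- def decode_monomial_indices(k: int, D: int, deg: int):
--     if deg == 0: return tuple()
--     idx = []; prev = 0; rem = k
--     for i in range(deg):
--         if prev >= D: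
--             continue
--         m = deg - i - 1
--         first = nck(D - prev + m - 1, m)
--         if rem < first:
--             # first candidate already exceeds rem: position stays at prev
--             idx.append(prev)
--             continue
--         top = nck(D - prev + m, m + 1)
--         # cum(v) = sum of rest(u) for u in [prev, v]  (hockey-stick closed form)
--         cum = lambda v: top - nck(D - v + m - 1, m + 1)
--         if cum(D - 1) <= rem:
--             rem -= cum(D - 1)
--             continue
--         lo, hi = prev, D - 1   # least v with cum(v) > rem exists; binary search
--         while lo < hi:
--             mid = (lo + hi) // 2
--             if cum(mid) > rem: hi = mid
--             else: lo = mid + 1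
--         idx.append(lo); prev = lo; rem -= cum(lo - 1)
--     return tuple(idx)
-- ===== Notes on version B (the rewrite author's own statement) =====
-- stated objective: alternative
-- what changed: Replaces A's per-position linear scan that subtracts one binomial count per candidate v by a cheap first-candidate test plus, when that fails, a hockey-stick closed form for the cumulative counts and a binary search over v, so a position never needs more than O(log D) binomial evaluations.
import Mathlib
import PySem

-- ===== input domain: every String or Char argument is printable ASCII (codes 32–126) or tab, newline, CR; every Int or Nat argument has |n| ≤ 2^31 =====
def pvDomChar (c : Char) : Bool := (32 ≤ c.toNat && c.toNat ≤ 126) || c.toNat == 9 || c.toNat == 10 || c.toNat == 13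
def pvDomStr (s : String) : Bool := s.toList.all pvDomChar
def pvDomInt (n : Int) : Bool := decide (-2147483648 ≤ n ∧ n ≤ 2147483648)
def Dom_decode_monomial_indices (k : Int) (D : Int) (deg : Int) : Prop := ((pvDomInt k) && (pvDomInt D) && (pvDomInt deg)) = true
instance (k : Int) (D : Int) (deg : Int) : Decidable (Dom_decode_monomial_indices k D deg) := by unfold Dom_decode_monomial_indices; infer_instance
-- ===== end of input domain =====

-- B replaces A's linear rem-subtracting scan over v in [prev, D) by an O(1)-evaluation
-- first-candidate test plus, when that fails, a hockey-stick closed form for the cumulative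
-- counts and a binary search over v (objective: alternative).

-- ===== PORT A =====
-- shared helper of both Python files: nck(n, k)
def nck (n k : Int) : Int :=
  if k < 0 ∨ n < k then 0
  else if k = 0 ∨ k = n then 1
  else
    let k' := min k (n - k)
    let p := (PySem.List.pyRange 1 (k' + 1) 1).foldl
      (fun (p : Int × Int) i => (p.1 * (n - (k' - i)), p.2 * i)) (1, 1)
    PySem.Int.floordiv p.1 p.2

-- A's inner 'for v in range(prev, D): … break' loop, on state (idx, prev, rem);
-- iterated with fuel (D - v).toNat = number of remaining candidates (Python's range is lazy,
-- so the loop is transcribed as a count-up recursion rather than a materialized list)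
def pyInner (D m : Int) : Nat → Int → (List Int × Int × Int) → (List Int × Int × Int)
  | 0, _, st => st
  | c + 1, v, (idx, prev, rem) =>
      let rest := nck ((D - v) + m - 1) m
      if rest ≤ rem then pyInner D m c (v + 1) (idx, prev, rem - rest)
      else (idx ++ [v], v, rem)

def decode_monomial_indices (k : Int) (D : Int) (deg : Int) : List Int :=
  if deg = 0 then []
  else
    ((PySem.List.pyRange 0 deg 1).foldl
      (fun (st : List Int × Int × Int) i =>
        pyInner D (deg - i - 1) (D - st.2.1).toNat st.2.1 st)
      ([], 0, k)).1

-- ===== PORT B =====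
-- least w in [lo, hi] with cum w > rem (caller guarantees cum hi > rem), Source B's while loop
def bsearch (cum : Int → Int) (rem lo hi : Int) : Int :=
  if h : lo < hi then
    let mid := PySem.Int.floordiv (lo + hi) 2
    if rem < cum mid then bsearch cum rem lo mid
    else bsearch cum rem (mid + 1) hi
  else lo
termination_by (hi - lo).toNat
decreasing_by
  · have h3 : PySem.Int.floordiv (lo + hi) 2 < hi := by
      rw [PySem.Int.floordiv_lt_iff_lt_mul (by omega)]; omega
    omega
  · have h2 := PySem.Int.floordiv_two_mid_bounds (le_of_lt h)
    omega

def decode_monomial_indices_alt (k : Int) (D : Int) (deg : Int) : List Int :=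
  if deg = 0 then []
  else
    ((PySem.List.pyRange 0 deg 1).foldl
      (fun (st : List Int × Int × Int) i =>
        match st with
        | (idx, prev, rem) =>
          if D ≤ prev then (idx, prev, rem)
          else
            let m := deg - i - 1
            let first := nck (D - prev + m - 1) m
            if rem < first then (idx ++ [prev], prev, rem)
            else
            let top := nck (D - prev + m) (m + 1)
            let cum := fun v => top - nck (D - v + m - 1) (m + 1)
            if cum (D - 1) ≤ rem then (idx, prev, rem - cum (D - 1))
            else
              let lo := bsearch cum rem prev (D - 1)
              (idx ++ [lo], lo, rem - cum (lo - 1)))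
      ([], 0, k)).1

-- ===== PRECONDITION & SPEC =====
def Spec_decode_monomial_indices (k : Int) (D : Int) (deg : Int) (out : List Int) : Prop := out = decode_monomial_indices_alt k D deg
instance (k : Int) (D : Int) (deg : Int) (out : List Int) : Decidable (Spec_decode_monomial_indices k D deg out) := by unfold Spec_decode_monomial_indices; infer_instance

-- ===== CLAIM (what is proved, stated in full; the proofs are below) =====
def Claim_equal_decode_monomial_indices : Prop := ∀ (k : Int) (D : Int) (deg : Int), Dom_decode_monomial_indices k D deg → Spec_decode_monomial_indices k D deg (decode_monomial_indices k D deg)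

-- ===== LEMMAS AND PROOFS =====

-- nck computes the binomial coefficient (0 outside 0 ≤ k ≤ n)
theorem nck_fold (n k' : Int) : ∀ (c : Nat),
    (PySem.List.pyRange 1 ((c : Int) + 1) 1).foldl
      (fun (p : Int × Int) i => (p.1 * (n - (k' - i)), p.2 * i)) (1, 1)
    = (∏ i ∈ Finset.range c, (n - k' + ((i : Int) + 1)), ((c.factorial : Nat) : Int)) := by
  intro c
  induction c with
  | zero => simp [PySem.List.pyRange_one_eq_nil]
  | succ c ih =>
      have h1 : (1 : Int) ≤ (c : Int) + 1 := by omega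
      have h2 : ((c + 1 : Nat) : Int) + 1 = ((c : Int) + 1) + 1 := by push_cast; ring
      rw [h2, PySem.List.pyRange_one_succ_right h1, List.foldl_append, ih]
      simp only [List.foldl_cons, List.foldl_nil, Prod.mk.injEq]
      refine ⟨?_, ?_⟩
      · rw [Finset.prod_range_succ]; push_cast; ring
      · rw [Nat.factorial_succ]; push_cast; ring

theorem nck_eq_choose (n k : Int) :
    nck n k = if 0 ≤ k ∧ k ≤ n then ((n.toNat.choose k.toNat : Nat) : Int) else 0 := by
  unfold nck
  by_cases h1 : k < 0 ∨ n < k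
  · rw [if_pos h1, if_neg (by omega)]
  · rw [if_neg h1]
    push_neg at h1
    obtain ⟨hk0, hkn⟩ := h1
    by_cases h2 : k = 0 ∨ k = n
    · rw [if_pos h2, if_pos (by omega)]
      rcases h2 with h2 | h2 <;> subst h2
      · simp
      · simp [Nat.choose_self]
    · rw [if_neg h2, if_pos (by omega)]
      push_neg at h2
      have hk1 : 1 ≤ k := by omega
      have hkn1 : k ≤ n - 1 := by omega
      have hn2 : 2 ≤ n := by omega
      set k' := min k (n - k) with hk'
      have hk'1 : 1 ≤ k' := by omega
      have hk'n : k' ≤ n - 1 := by omega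
      set c := k'.toNat with hc
      have hcast : (c : Int) = k' := Int.toNat_of_nonneg (by omega)
      have hfold := nck_fold n k' c
      rw [hcast] at hfold
      show PySem.Int.floordiv
        (((PySem.List.pyRange 1 (k' + 1) 1).foldl (fun (p : Int × Int) i => (p.1 * (n - (k' - i)), p.2 * i)) (1, 1)).1)
        (((PySem.List.pyRange 1 (k' + 1) 1).foldl (fun (p : Int × Int) i => (p.1 * (n - (k' - i)), p.2 * i)) (1, 1)).2)
        = _
      rw [hfold]
      -- numerator is the descending factorial
      set a := (n - k').toNat with ha
      have hacast : (a : Int) = n - k' := Int.toNat_of_nonneg (by omega)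
      have hprod : (∏ i ∈ Finset.range c, (n - k' + ((i : Int) + 1)))
          = (((a + 1).ascFactorial c : Nat) : Int) := by
        rw [Nat.ascFactorial_eq_prod_range]
        push_cast
        apply Finset.prod_congr rfl
        intro i _
        omega
      have hdesc : (a + 1).ascFactorial c = (a + c).descFactorial c :=
        (Nat.add_descFactorial_eq_ascFactorial a c).symm
      have hac : a + c = n.toNat := by omega
      have hdesc2 : n.toNat.descFactorial c = n.toNat.choose c * c.factorial := by
        rw [Nat.choose_eq_descFactorial_div_factorial,
          Nat.div_mul_cancel (Nat.factorial_dvd_descFactorial n.toNat c)]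
      have hchoose : n.toNat.choose c = n.toNat.choose k.toNat := by
        rcases le_or_gt k (n - k) with hle | hgt
        · have : k' = k := by omega
          rw [hc, this]
        · have hcn : c = (n - k).toNat := by omega
          rw [hcn]
          have : (n - k).toNat = n.toNat - k.toNat := by omega
          rw [this]
          exact Nat.choose_symm (by omega)
      simp only [hprod, hdesc, hac, hdesc2, hchoose]
      have hfacpos : (0 : Int) < (c.factorial : Int) := by exact_mod_cast c.factorial_pos
      rw [PySem.Int.floordiv_eq_ediv_of_pos hfacpos]
      push_cast
      rw [Int.mul_ediv_cancel _ (by exact_mod_cast c.factorial_pos.ne')]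

theorem nck_nonneg (n k : Int) : 0 ≤ nck n k := by
  rw [nck_eq_choose]; split_ifs <;> positivity

theorem nck_zero_of_lt (n k : Int) (h : n < k) : nck n k = 0 := by
  rw [nck_eq_choose, if_neg (by omega)]

theorem nck_pascal (n k : Int) (hk : 1 ≤ k) :
    nck n k = nck (n - 1) k + nck (n - 1) (k - 1) := by
  rw [nck_eq_choose, nck_eq_choose, nck_eq_choose]
  split_ifs with h1 h2 h3 h2 h3 <;> try omega
  · -- 1 ≤ k ≤ n-1 : Pascal on Nat.choose
    have ha : n.toNat = (n - 1).toNat + 1 := by omega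
    have hb : k.toNat = (k - 1).toNat + 1 := by omega
    rw [ha, hb, Nat.choose_succ_succ']
    push_cast
    ring
  · -- k = n : choose n n = 0 + choose (n-1) (n-1)
    have ha : k.toNat = n.toNat := by omega
    have hb : (k - 1).toNat = (n - 1).toNat := by omega
    rw [ha, hb, Nat.choose_self, Nat.choose_self]
    ring

-- G D m w = number of monomials of degree m in variables w..D-1 summed tail; A's cumulative counter
def G (D m w : Int) : Int := nck (D - w + m) (m + 1)

theorem G_step (D m v : Int) (hm : 0 ≤ m) :
    G D m v = G D m (v + 1) + nck ((D - v) + m - 1) m := by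
  have h := nck_pascal (D - v + m) (m + 1) (by omega)
  unfold G
  have e1 : D - v + m - 1 = D - (v + 1) + m := by ring
  have e2 : m + 1 - 1 = m := by ring
  rw [h, e1, e2]

theorem G_antitone (D m : Int) (hm : 0 ≤ m) : ∀ (c : Nat) (v w : Int), v ≤ w → (w - v).toNat = c → G D m w ≤ G D m v := by
  intro c
  induction c with
  | zero => intro v w h1 h2; have : v = w := by omega
            rw [this]
  | succ c ih =>
      intro v w h1 h2
      have h3 := ih (v + 1) w (by omega) (by omega)
      have h4 := G_step D m v hm
      have h5 := nck_nonneg ((D - v) + m - 1) m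
      omega

theorem G_D_eq_zero (D m : Int) : G D m D = 0 := by
  unfold G
  apply nck_zero_of_lt
  omega

theorem G_nonneg (D m w : Int) : 0 ≤ G D m w := nck_nonneg _ _

-- A's scan never breaks when the total tail count G D m v is ≤ rem
theorem scan_skip (D m : Int) (hm : 0 ≤ m) :
    ∀ (c : Nat) (v rem : Int) (idx : List Int) (prev : Int), (D - v).toNat = c → G D m v ≤ rem →
      pyInner D m c v (idx, prev, rem) = (idx, prev, rem - G D m v) := by
  intro c
  induction c with
  | zero =>
      intro v rem idx prev hc hle
      have hz : G D m v = 0 := nck_zero_of_lt _ _ (by omega)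
      rw [hz]
      simp [pyInner]
  | succ c ih =>
      intro v rem idx prev hc hle
      have hstep := G_step D m v hm
      have hnn := G_nonneg D m (v + 1)
      simp only [pyInner]
      rw [if_pos (by omega)]
      rw [ih (v + 1) (rem - nck ((D - v) + m - 1) m) idx prev (by omega) (by omega)]
      have : rem - nck ((D - v) + m - 1) m - G D m (v + 1) = rem - G D m v := by omega
      rw [this]

-- A's scan breaks exactly at the least w whose cumulative count exceeds rem
theorem scan_find (D m : Int) (hm : 0 ≤ m) :
    ∀ (c : Nat) (v rem : Int) (idx : List Int) (prev w : Int), (w - v).toNat = c → v ≤ w → w < D →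
      rem < G D m v - G D m (w + 1) →
      (∀ u, v ≤ u → u < w → G D m v - G D m (u + 1) ≤ rem) →
      pyInner D m ((D - v).toNat) v (idx, prev, rem) = (idx ++ [w], w, rem - (G D m v - G D m w)) := by
  intro c
  induction c with
  | zero =>
      intro v rem idx prev w hc hvw hwD hbrk hkeep
      have hvweq : v = w := by omega
      subst hvweq
      have hfuel : (D - v).toNat = (D - (v + 1)).toNat + 1 := by omega
      rw [hfuel]
      have hstep := G_step D m v hm
      simp only [pyInner]
      rw [if_neg (by omega)]
      have : rem - (G D m v - G D m v) = rem := by omega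
      rw [this]
  | succ c ih =>
      intro v rem idx prev w hc hvw hwD hbrk hkeep
      have hvltw : v < w := by omega
      have hfuel : (D - v).toNat = (D - (v + 1)).toNat + 1 := by omega
      rw [hfuel]
      have hstep := G_step D m v hm
      have hu := hkeep v (le_refl v) hvltw
      simp only [pyInner]
      rw [if_pos (by omega)]
      rw [ih (v + 1) (rem - nck ((D - v) + m - 1) m) idx prev w (by omega) (by omega) hwD
        (by omega) (fun u hu1 hu2 => by have := hkeep u (by omega) hu2; omega)]
      have : rem - nck ((D - v) + m - 1) m - (G D m (v + 1) - G D m w) = rem - (G D m v - G D m w) := by omega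
      rw [this]

-- bsearch finds the least point of a monotone predicate
theorem bsearch_spec (cum : Int → Int) (rem : Int) :
    ∀ (c : Nat) (lo hi : Int), (hi - lo).toNat = c → lo ≤ hi →
      (∀ u v : Int, u ≤ v → cum u ≤ cum v) → rem < cum hi →
      lo ≤ bsearch cum rem lo hi ∧ bsearch cum rem lo hi ≤ hi ∧
      rem < cum (bsearch cum rem lo hi) ∧
      ∀ u, lo ≤ u → u < bsearch cum rem lo hi → cum u ≤ rem := by
  intro c
  induction c using Nat.strong_induction_on with
  | _ c ih =>
      intro lo hi hc hle hmono hhi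
      by_cases h : lo < hi
      · rw [bsearch, dif_pos h]
        have hb := PySem.Int.floordiv_two_mid_bounds (le_of_lt h)
        have hlt : PySem.Int.floordiv (lo + hi) 2 < hi := by
          rw [PySem.Int.floordiv_lt_iff_lt_mul (by omega)]; omega
        set mid := PySem.Int.floordiv (lo + hi) 2 with hmid
        by_cases hcm : rem < cum mid
        · rw [if_pos hcm]
          have hrec := ih (mid - lo).toNat (by omega) lo mid rfl (by omega) hmono hcm
          exact ⟨hrec.1, by omega, hrec.2.2.1, hrec.2.2.2⟩
        · rw [if_neg hcm]
          have hrec := ih (hi - (mid + 1)).toNat (by omega) (mid + 1) hi rfl (by omega) hmono hhi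
          refine ⟨by omega, hrec.2.1, hrec.2.2.1, ?_⟩
          intro u hu1 hu2
          by_cases hu3 : u ≤ mid
          · exact le_trans (hmono u mid hu3) (not_lt.mp hcm)
          · exact hrec.2.2.2 u (by omega) hu2
      · rw [bsearch, dif_neg h]
        have heq : lo = hi := by omega
        subst heq
        exact ⟨le_refl lo, le_refl lo, hhi, fun u h1 h2 => by omega⟩

theorem cum_eq_G (D m : Int) (prev v : Int) :
    nck (D - prev + m) (m + 1) - nck (D - v + m - 1) (m + 1) = G D m prev - G D m (v + 1) := by
  have e : D - v + m - 1 = D - (v + 1) + m := by ring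
  unfold G
  rw [e]

theorem step_eq (D deg : Int) (i : Int) (hid : i < deg)
    (idx : List Int) (prev rem : Int) :
    pyInner D (deg - i - 1) ((D - prev).toNat) prev (idx, prev, rem) =
      (if D ≤ prev then (idx, prev, rem)
       else
         let m := deg - i - 1
         let first := nck (D - prev + m - 1) m
         if rem < first then (idx ++ [prev], prev, rem)
         else
         let top := nck (D - prev + m) (m + 1)
         let cum := fun v => top - nck (D - v + m - 1) (m + 1)
         if cum (D - 1) ≤ rem then (idx, prev, rem - cum (D - 1))
         else
           let lo := bsearch cum rem prev (D - 1)
           (idx ++ [lo], lo, rem - cum (lo - 1))) := by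
  set m := deg - i - 1 with hm'
  have hm : 0 ≤ m := by omega
  by_cases hpD : D ≤ prev
  · rw [if_pos hpD]
    have hz : (D - prev).toNat = 0 := by omega
    rw [hz]
    rfl
  · rw [if_neg hpD]
    have hGD : G D m D = 0 := G_D_eq_zero D m
    have hcum : ∀ v : Int, nck (D - prev + m) (m + 1) - nck (D - v + m - 1) (m + 1)
        = G D m prev - G D m (v + 1) := cum_eq_G D m prev
    by_cases hfirst : rem < nck (D - prev + m - 1) m
    · rw [if_pos hfirst]
      have hself := G_step D m prev hm
      rw [scan_find D m hm 0 prev rem idx prev prev (by omega) (le_refl prev) (by omega)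
        (by omega) (fun u h1 h2 => absurd h2 (by omega))]
      have : rem - (G D m prev - G D m prev) = rem := by omega
      rw [this]
    · rw [if_neg hfirst]
      show pyInner D m ((D - prev).toNat) prev (idx, prev, rem) =
        (if nck (D - prev + m) (m + 1) - nck (D - (D - 1) + m - 1) (m + 1) ≤ rem then _ else _)
      rw [hcum (D - 1)]
      have hD1 : D - 1 + 1 = D := by ring
      rw [hD1, hGD]
      by_cases hsk : G D m prev - 0 ≤ rem
      · rw [if_pos hsk]
        rw [scan_skip D m hm (D - prev).toNat prev rem idx prev rfl (by omega)]
        show (idx, prev, rem - G D m prev) =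
          (idx, prev, rem - (nck (D - prev + m) (m + 1) - nck (D - (D - 1) + m - 1) (m + 1)))
        rw [hcum (D - 1), hD1, hGD]
        norm_num
      · rw [if_neg hsk]
        set cum := fun v => nck (D - prev + m) (m + 1) - nck (D - v + m - 1) (m + 1) with hcumdef
        have hmono : ∀ u v : Int, u ≤ v → cum u ≤ cum v := by
          intro u v huv
          show nck (D - prev + m) (m + 1) - nck (D - u + m - 1) (m + 1) ≤
            nck (D - prev + m) (m + 1) - nck (D - v + m - 1) (m + 1)
          rw [hcum u, hcum v] at *
          have := G_antitone D m hm (v - u).toNat (u + 1) (v + 1) (by omega) (by omega)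
          omega
        have hhi : rem < cum (D - 1) := by
          show rem < nck (D - prev + m) (m + 1) - nck (D - (D - 1) + m - 1) (m + 1)
          rw [hcum (D - 1), hD1, hGD]
          omega
        have hbs := bsearch_spec cum rem (D - 1 - prev).toNat prev (D - 1) rfl (by omega) hmono hhi
        set w := bsearch cum rem prev (D - 1) with hw
        have hQ : rem < G D m prev - G D m (w + 1) := by
          have := hbs.2.2.1
          rw [show cum w = G D m prev - G D m (w + 1) from hcum w] at this
          exact this
        have hK : ∀ u, prev ≤ u → u < w → G D m prev - G D m (u + 1) ≤ rem := by
          intro u h1 h2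
          have := hbs.2.2.2 u h1 h2
          rw [show cum u = G D m prev - G D m (u + 1) from hcum u] at this
          exact this
        rw [scan_find D m hm (w - prev).toNat prev rem idx prev w rfl hbs.1 (by omega) hQ hK]
        show (idx ++ [w], w, rem - (G D m prev - G D m w)) =
          (idx ++ [w], w, rem - (nck (D - prev + m) (m + 1) - nck (D - (w - 1) + m - 1) (m + 1)))
        rw [hcum (w - 1), show w - 1 + 1 = w from by ring]

theorem decode_eq (k D deg : Int) :
    decode_monomial_indices k D deg = decode_monomial_indices_alt k D deg := by
  unfold decode_monomial_indices decode_monomial_indices_alt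
  by_cases h0 : deg = 0
  · rw [if_pos h0, if_pos h0]
  · rw [if_neg h0, if_neg h0]
    congr 1
    apply PySem.List.foldl_congr_mem
    intro st i hi
    rw [PySem.List.mem_pyRange_one] at hi
    obtain ⟨idx, prev, rem⟩ := st
    exact step_eq D deg i hi.2 idx prev rem

-- ===== VERDICT (by name: the statement is the Claim_ definition above) =====
theorem decode_monomial_indices_spec : Claim_equal_decode_monomial_indices := by
  intro k D deg _
  unfold Spec_decode_monomial_indices
  exact decode_eq k D deg
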